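-- pv_equiv track=rewrite | github.com/web3guru888/asi-build | src/asi_build/cognitive_synergy/core/synergy_metrics.py | _lz76_simple
-- ===== SOURCE A (Python) =====
-- def _lz76_simple(s: str, n: int) -> int:
--     """LZ76 factorisation using direct substring search — O(n²)."""
--     complexity = 1
--     i = 0
--     k = 1
--     while i + k <= n:
--         substring = s[i:i + k]
--         prefix = s[:i + k - 1]
--         if substring in prefix:
--             k += 1
--         else:
--             complexity += 1
--             i += k
--             k = 1
--     return complexity
-- ===== SOURCE B (Python) =====
-- def _lz76_simple(s: str, n: int) -> int:
--     """LZ76 factorisation: per phrase, compute the longest previous match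
--     directly by character comparison (no substring re-search per length)."""
--     L = len(s)
--     complexity = 1
--     i = 0
--     while True:
--         m = 0
--         for j in range(i):
--             l = 0
--             while i + l < L and s[j + l] == s[i + l]:
--                 l += 1
--             if l > m:
--                 m = l
--         if i + m + 1 <= n and i + m < L:
--             complexity += 1
--             i += m + 1
--         else:
--             return complexity
-- ===== Notes on version B (the rewrite author's own statement) =====
-- stated objective: alternative
-- what changed: Instead of growing a candidate substring one character at a time and re-searching it in the growing prefix, B computes each phrase's length in one step as 1 + the maximum longest-common-prefix between the current position and every earlier position, by direct character comparison.
import Mathlib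
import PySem

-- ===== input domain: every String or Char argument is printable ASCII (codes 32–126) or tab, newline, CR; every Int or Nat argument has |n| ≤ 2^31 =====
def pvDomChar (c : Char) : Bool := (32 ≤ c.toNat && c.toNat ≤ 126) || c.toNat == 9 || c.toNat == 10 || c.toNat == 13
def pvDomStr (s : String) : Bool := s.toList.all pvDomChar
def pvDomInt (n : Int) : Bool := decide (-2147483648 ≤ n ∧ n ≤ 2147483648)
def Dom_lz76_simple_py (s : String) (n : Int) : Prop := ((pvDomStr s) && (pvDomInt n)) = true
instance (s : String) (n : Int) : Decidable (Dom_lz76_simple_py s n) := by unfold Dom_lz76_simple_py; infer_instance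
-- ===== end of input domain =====

-- B replaces A's grow-and-re-search substring scan by a per-phrase longest-previous-match
-- computed once by direct character comparison (alternative algorithm, same results).

-- ===== PORT A =====
-- A's while loop: state (complexity, i, k); i+k increases by 1 each iteration, so
-- (n - (i+k) + 1).toNat is a termination measure.  `substring in prefix` is
-- PySem.Chars.isIn on the two Python slices s[i:i+k] and s[:i+k-1].
def lzALoop (cs : List Char) (n complexity i k : Int) : Int :=
  if _h : i + k ≤ n then
    if PySem.Chars.isIn (PySem.List.slice cs (some i) (some (i + k)))
        (PySem.List.slice cs none (some (i + k - 1))) then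
      lzALoop cs n complexity i (k + 1)
    else
      lzALoop cs n (complexity + 1) (i + k) 1
  else complexity
termination_by (n - (i + k) + 1).toNat
decreasing_by all_goals omega

def lz76_simple_py (s : String) (n : Int) : Int := lzALoop s.toList n 1 0 1

-- ===== PORT B =====
-- Source B's inner while: common-match length from offset l (j + l < i + l < len, so [·]? is exact
-- where Python indexes).
def lzBLcp (cs : List Char) (i j l : Nat) : Nat :=
  if h : i + l < cs.length ∧ cs[j + l]? = cs[i + l]? then lzBLcp cs i j (l + 1) else l
termination_by cs.length - (i + l)
decreasing_by omega

-- Source B's `for j in range(i)` maximising m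
def lzBBest (cs : List Char) (i : Nat) : Nat :=
  (List.range i).foldl (fun m j => let l := lzBLcp cs i j 0; if l > m then l else m) 0

-- Source B's outer while
def lzBLoop (cs : List Char) (n complexity : Int) (i : Nat) : Int :=
  let m := lzBBest cs i
  if h : (i : Int) + m + 1 ≤ n ∧ i + m < cs.length then
    lzBLoop cs n (complexity + 1) (i + m + 1)
  else complexity
termination_by cs.length - i
decreasing_by omega

def lz76_simple_py_alt (s : String) (n : Int) : Int := lzBLoop s.toList n 1 0

-- ===== PRECONDITION & SPEC =====
def Spec_lz76_simple_py (s : String) (n : Int) (out : Int) : Prop := out = lz76_simple_py_alt s n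
instance (s : String) (n : Int) (out : Int) : Decidable (Spec_lz76_simple_py s n out) := by unfold Spec_lz76_simple_py; infer_instance

-- ===== CLAIM (what is proved, stated in full; the proofs are below) =====
def Claim_equal_lz76_simple_py : Prop := ∀ (s : String) (n : Int), Dom_lz76_simple_py s n → Spec_lz76_simple_py s n (lz76_simple_py s n)

-- ===== LEMMAS AND PROOFS =====


theorem lzBLcp_lt (cs : List Char) (i j l : Nat) :
    ∀ t, l ≤ t → t < lzBLcp cs i j l → i + t < cs.length ∧ cs[j + t]? = cs[i + t]? := by
  fun_induction lzBLcp with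
  | case1 l h ih =>
    intro t hlt hup
    rcases Nat.eq_or_lt_of_le hlt with rfl | hlt'
    · exact h
    · exact ih t hlt' hup
  | case2 l h => intro t hlt hup; omega

theorem lzBLcp_stop (cs : List Char) (i j l : Nat) :
    ¬ (i + lzBLcp cs i j l < cs.length ∧ cs[j + lzBLcp cs i j l]? = cs[i + lzBLcp cs i j l]?) := by
  fun_induction lzBLcp with
  | case1 l h ih => exact ih
  | case2 l h => exact h

theorem lzBLcp_ge_iff (cs : List Char) (i j k : Nat) :
    k ≤ lzBLcp cs i j 0 ↔ ∀ t < k, i + t < cs.length ∧ cs[j + t]? = cs[i + t]? := by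
  constructor
  · intro h t ht
    exact lzBLcp_lt cs i j 0 t (Nat.zero_le t) (lt_of_lt_of_le ht h)
  · intro h
    by_contra hlt
    exact lzBLcp_stop cs i j 0 (h _ (by omega))

theorem lz_foldl_max_ge (g : Nat → Nat) (l : List Nat) (acc : Nat) :
    acc ≤ l.foldl (fun m j => if g j > m then g j else m) acc ∧
    ∀ j ∈ l, g j ≤ l.foldl (fun m j => if g j > m then g j else m) acc := by
  induction l generalizing acc with
  | nil => simp
  | cons a l ih =>
    simp only [List.foldl_cons, List.mem_cons]
    refine ⟨le_trans (by split <;> omega) (ih _).1, ?_⟩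
    rintro j (rfl | hj)
    · exact le_trans (by split <;> omega) (ih _).1
    · exact (ih _).2 j hj

theorem lz_foldl_max_cases (g : Nat → Nat) (l : List Nat) (acc : Nat) :
    l.foldl (fun m j => if g j > m then g j else m) acc = acc ∨
    ∃ j ∈ l, l.foldl (fun m j => if g j > m then g j else m) acc = g j := by
  induction l generalizing acc with
  | nil => simp
  | cons a l ih =>
    simp only [List.foldl_cons, List.mem_cons]
    rcases ih (if g a > acc then g a else acc) with h | ⟨j, hj, h⟩
    · by_cases ha : g a > acc
      · right; exact ⟨a, Or.inl rfl, by rw [h, if_pos ha]⟩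
      · left; rw [h, if_neg ha]
    · right; exact ⟨j, Or.inr hj, h⟩

theorem lzBBest_eq (cs : List Char) (i : Nat) :
    lzBBest cs i = (List.range i).foldl (fun m j => if lzBLcp cs i j 0 > m then lzBLcp cs i j 0 else m) 0 := rfl

theorem lzBBest_ge (cs : List Char) (i j : Nat) (hj : j < i) :
    lzBLcp cs i j 0 ≤ lzBBest cs i := by
  rw [lzBBest_eq]
  exact (lz_foldl_max_ge (fun j => lzBLcp cs i j 0) (List.range i) 0).2 j (List.mem_range.mpr hj)

theorem lzBBest_cases (cs : List Char) (i : Nat) :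
    lzBBest cs i = 0 ∨ ∃ j < i, lzBBest cs i = lzBLcp cs i j 0 := by
  rw [lzBBest_eq]
  rcases lz_foldl_max_cases (fun j => lzBLcp cs i j 0) (List.range i) 0 with h | ⟨j, hj, h⟩
  · exact Or.inl h
  · exact Or.inr ⟨j, List.mem_range.mp hj, h⟩

theorem lzA_cond_iff (cs : List Char) (i k : Nat) (hk : 1 ≤ k) :
    (PySem.Chars.isIn (PySem.List.slice cs (some (i : Int)) (some ((i : Int) + (k : Int))))
      (PySem.List.slice cs none (some ((i : Int) + (k : Int) - 1))) = true)
    ↔ (cs.length < i + k ∨ k ≤ lzBBest cs i) := by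
  have hcast : (i : Int) + (k : Int) = ((i + k : Nat) : Int) := by push_cast; ring
  have hcast1 : (i : Int) + (k : Int) - 1 = ((i + k - 1 : Nat) : Int) := by push_cast [Nat.cast_sub (by omega : 1 ≤ i + k)]; ring
  rw [hcast1, PySem.List.slice_to cs (by positivity : (0:Int) ≤ ((i + k - 1 : Nat) : Int)), Int.toNat_natCast, hcast,
    PySem.List.slice_natCast, PySem.Chars.isIn_iff_infix]
  have hsub : i + k - i = k := by omega
  rw [hsub]
  by_cases hL : cs.length < i + k
  · simp only [hL, true_or, iff_true]
    rw [List.take_of_length_le (by simp; omega), List.take_of_length_le (by omega)]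
    exact (List.drop_suffix i cs).isInfix
  · rw [or_iff_right hL]
    have hik : i + k ≤ cs.length := by omega
    constructor
    · rintro ⟨u, v, heq⟩
      -- occurrence at j := u.length inside the prefix
      have hlen : u.length + k + v.length = i + k - 1 := by
        have := congrArg List.length heq
        simp [List.length_take, List.length_drop] at this
        omega
      have hj : u.length < i := by omega
      have hchars : ∀ t < k, i + t < cs.length ∧ cs[u.length + t]? = cs[i + t]? := by
        intro t ht
        refine ⟨by omega, ?_⟩
        have h1 : (u ++ (List.take k (List.drop i cs) ++ v))[u.length + t]? = cs[i + t]? := by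
          rw [List.getElem?_append_right (by omega)]
          have : u.length + t - u.length = t := by omega
          rw [this, List.getElem?_append_left (by simp [List.length_take, List.length_drop]; omega),
            List.getElem?_take, if_pos ht, List.getElem?_drop]
        rw [← List.append_assoc] at h1
        rw [heq] at h1
        rw [List.getElem?_take, if_pos (by omega)] at h1
        exact h1
      calc k ≤ lzBLcp cs i u.length 0 := (lzBLcp_ge_iff cs i u.length k).mpr hchars
        _ ≤ lzBBest cs i := lzBBest_ge cs i u.length hj
    · intro hkb
      rcases lzBBest_cases cs i with h0 | ⟨j, hj, hbj⟩
      · omega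
      · have hklcp : k ≤ lzBLcp cs i j 0 := by omega
        have hchars := (lzBLcp_ge_iff cs i j k).mp hklcp
        have heq : List.take k (List.drop i cs) =
            List.take k (List.drop j (List.take (i + k - 1) cs)) := by
          apply List.ext_getElem?
          intro t
          by_cases ht : t < k
          · rw [List.getElem?_take, if_pos ht, List.getElem?_drop,
              List.getElem?_take, if_pos ht, List.getElem?_drop,
              List.getElem?_take, if_pos (by omega)]
            exact ((hchars t ht).2).symm
          · rw [List.getElem?_take, if_neg ht, List.getElem?_take, if_neg ht]
        rw [heq]
        exact (List.take_prefix k _).isInfix.trans (List.drop_suffix j _).isInfix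

theorem lzA_tail (cs : List Char) (n : Int) (i : Nat) (hm : cs.length ≤ i + lzBBest cs i) :
    ∀ (f k : Nat), 1 ≤ k → (n - ((i : Int) + (k : Int)) + 1).toNat ≤ f → ∀ c,
      lzALoop cs n c (i : Int) (k : Int) = c := by
  intro f
  induction f with
  | zero =>
    intro k hk hf c
    rw [lzALoop]
    rw [dif_neg (by omega)]
  | succ f ih =>
    intro k hk hf c
    rw [lzALoop]
    by_cases hn : (i : Int) + (k : Int) ≤ n
    · rw [dif_pos hn]
      have hcond : (PySem.Chars.isIn (PySem.List.slice cs (some (i : Int)) (some ((i : Int) + (k : Int))))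
          (PySem.List.slice cs none (some ((i : Int) + (k : Int) - 1))) = true) := by
        rw [lzA_cond_iff cs i k hk]
        by_cases hkb : k ≤ lzBBest cs i
        · exact Or.inr hkb
        · exact Or.inl (by omega)
      rw [if_pos hcond]
      have : ((k : Int) + 1) = ((k + 1 : Nat) : Int) := by push_cast; ring
      rw [this]
      exact ih (k + 1) (by omega) (by omega) c
    · rw [dif_neg hn]

theorem lzA_grow (cs : List Char) (n : Int) (i : Nat) (hm : i + lzBBest cs i < cs.length) :
    ∀ (g k : Nat), 1 ≤ k → k ≤ lzBBest cs i + 1 → lzBBest cs i + 1 - k ≤ g → ∀ c,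
      lzALoop cs n c (i : Int) (k : Int) =
        if (i : Int) + lzBBest cs i + 1 ≤ n then
          lzALoop cs n (c + 1) ((i : Int) + lzBBest cs i + 1) 1
        else c := by
  intro g
  induction g with
  | zero =>
    intro k hk hk2 hg c
    have hkeq : k = lzBBest cs i + 1 := by omega
    subst hkeq
    rw [lzALoop]
    by_cases hn : (i : Int) + ((lzBBest cs i + 1 : Nat) : Int) ≤ n
    · rw [dif_pos hn]
      have hcond : ¬ (PySem.Chars.isIn (PySem.List.slice cs (some (i : Int)) (some ((i : Int) + ((lzBBest cs i + 1 : Nat) : Int))))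
          (PySem.List.slice cs none (some ((i : Int) + ((lzBBest cs i + 1 : Nat) : Int) - 1))) = true) := by
        rw [lzA_cond_iff cs i _ (by omega)]
        push_neg
        exact ⟨by omega, by omega⟩
      rw [if_neg hcond]
      rw [if_pos (by push_cast at hn ⊢; omega)]
      congr 1
    · rw [dif_neg hn]
      rw [if_neg (by push_cast at hn ⊢; omega)]
  | succ g ih =>
    intro k hk hk2 hg c
    by_cases hkb : k ≤ lzBBest cs i
    · rw [lzALoop]
      by_cases hn : (i : Int) + (k : Int) ≤ n
      · rw [dif_pos hn]
        have hcond : (PySem.Chars.isIn (PySem.List.slice cs (some (i : Int)) (some ((i : Int) + (k : Int))))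
            (PySem.List.slice cs none (some ((i : Int) + (k : Int) - 1))) = true) :=
          (lzA_cond_iff cs i k hk).mpr (Or.inr hkb)
        rw [if_pos hcond]
        have : ((k : Int) + 1) = ((k + 1 : Nat) : Int) := by push_cast; ring
        rw [this]
        exact ih (k + 1) (by omega) (by omega) (by omega) c
      · rw [dif_neg hn]
        rw [if_neg (by omega)]
    · -- k = lzBBest + 1 : same as the base case
      have hkeq : k = lzBBest cs i + 1 := by omega
      subst hkeq
      rw [lzALoop]
      by_cases hn : (i : Int) + ((lzBBest cs i + 1 : Nat) : Int) ≤ n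
      · rw [dif_pos hn]
        have hcond : ¬ (PySem.Chars.isIn (PySem.List.slice cs (some (i : Int)) (some ((i : Int) + ((lzBBest cs i + 1 : Nat) : Int))))
            (PySem.List.slice cs none (some ((i : Int) + ((lzBBest cs i + 1 : Nat) : Int) - 1))) = true) := by
          rw [lzA_cond_iff cs i _ (by omega)]
          push_neg
          exact ⟨by omega, by omega⟩
        rw [if_neg hcond]
        rw [if_pos (by push_cast at hn ⊢; omega)]
        congr 1
      · rw [dif_neg hn]
        rw [if_neg (by push_cast at hn ⊢; omega)]

theorem lz_main (cs : List Char) (n : Int) :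
    ∀ (f : Nat) (i : Nat) (c : Int), cs.length - i ≤ f →
      lzALoop cs n c (i : Int) 1 = lzBLoop cs n c i := by
  intro f
  induction f with
  | zero =>
    intro i c hf
    rw [lzBLoop]
    rw [dif_neg (by omega)]
    have ht := lzA_tail cs n i (by omega) (n - ((i : Int) + ((1 : Nat) : Int)) + 1).toNat 1 le_rfl le_rfl c
    push_cast at ht
    exact ht
  | succ f ih =>
    intro i c hf
    rw [lzBLoop]
    by_cases hcase : i + lzBBest cs i < cs.length
    · have hgrow := lzA_grow cs n i hcase (lzBBest cs i) 1 (by omega) (by omega) (by omega) c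
      push_cast at hgrow
      rw [hgrow]
      by_cases hn : (i : Int) + lzBBest cs i + 1 ≤ n
      · rw [if_pos hn, dif_pos ⟨hn, hcase⟩]
        have hcast : (i : Int) + (lzBBest cs i) + 1 = ((i + lzBBest cs i + 1 : Nat) : Int) := by push_cast; ring
        rw [hcast]
        exact ih (i + lzBBest cs i + 1) (c + 1) (by omega)
      · rw [if_neg hn, dif_neg (by push_neg; intro h; omega)]
    · rw [dif_neg (by push_neg; intro h; omega)]
      have ht := lzA_tail cs n i (by omega) (n - ((i : Int) + ((1 : Nat) : Int)) + 1).toNat 1 le_rfl le_rfl c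
      push_cast at ht
      exact ht

-- ===== VERDICT (by name: the statement is the Claim_ definition above) =====
theorem lz76_simple_py_spec : Claim_equal_lz76_simple_py := by
  intro s n _
  unfold Spec_lz76_simple_py lz76_simple_py lz76_simple_py_alt
  have h := lz_main s.toList n s.toList.length 0 1 (by omega)
  simpa using h
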